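-- pv_equiv track=rewrite | github.com/dansobolev/practice_NPP_signal | signal_app/trees_algorithms.py | to_descendants_list
-- ===== SOURCE A (Python) =====
-- def to_descendants_list(anc_list):
--     ancs_list = anc_list.copy()
--     desc_list = []
--     n = len(ancs_list) + 1
--     for i in range(n):
--         n_descs = sum(map(lambda x: x == i, ancs_list))
--         i_descs = []
--         for _ in range(n_descs):
--             indx = ancs_list.index(i)
--             ancs_list[indx] = -1
--             i_descs.append(indx)
--         desc_list.append(i_descs)
--     return desc_list
-- ===== SOURCE B (Python) =====
-- def to_descendants_list(anc_list):
--     n = len(anc_list) + 1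
--     desc_list = [[] for _ in range(n)]
--     for j, v in enumerate(anc_list):
--         if 0 <= v < n:
--             desc_list[v].append(j)
--     return desc_list
-- ===== Notes on version B (the rewrite author's own statement) =====
-- stated objective: faster
-- what changed: B replaces A's per-parent counting/index/erase scans over the whole list with a single pass that appends each index to its parent's bucket (bounds-checked), turning O(n^2) into O(n).
import Mathlib
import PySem

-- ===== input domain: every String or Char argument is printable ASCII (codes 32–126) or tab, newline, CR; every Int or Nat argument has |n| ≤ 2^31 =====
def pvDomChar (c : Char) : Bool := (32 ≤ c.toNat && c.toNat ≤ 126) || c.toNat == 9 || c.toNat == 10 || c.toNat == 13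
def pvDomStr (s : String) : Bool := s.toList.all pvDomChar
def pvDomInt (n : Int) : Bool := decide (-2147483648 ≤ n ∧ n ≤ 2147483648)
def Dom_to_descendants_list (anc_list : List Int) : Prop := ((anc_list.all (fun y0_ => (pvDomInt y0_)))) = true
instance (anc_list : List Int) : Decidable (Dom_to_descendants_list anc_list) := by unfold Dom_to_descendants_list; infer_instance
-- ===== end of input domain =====

-- B replaces A's quadratic per-parent scan-and-erase with one linear pass that appends each
-- index to its parent's bucket (objective: faster, asymptotic).

-- ===== PORT A =====
-- inner 'for _ in range(n_descs): indx = ancs_list.index(i); ancs_list[indx] = -1; i_descs.append(indx)'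
-- (the 'none' branch is Python's ValueError, unreachable because the fuel is exactly the count of i)
def pvInnerA (i : Int) : Nat → List Int → List Int → List Int × List Int
  | 0, anc, acc => (anc, acc)
  | k+1, anc, acc =>
    match PySem.List.index? anc i with
    | none => (anc, acc)
    | some idx => pvInnerA i k (anc.set idx (-1)) (acc ++ [(idx : Int)])

def to_descendants_list (anc_list : List Int) : List (List Int) :=
  let n := anc_list.length + 1
  ((List.range n).foldl
    (fun (st : List Int × List (List Int)) (i : Nat) =>
      let n_descs := ((st.1.map (fun x => if x = (i : Int) then (1 : Int) else 0)).sum).toNat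
      let p := pvInnerA (i : Int) n_descs st.1 []
      (p.1, st.2 ++ [p.2]))
    (anc_list, [])).2

-- ===== PORT B =====
def to_descendants_list_alt (anc_list : List Int) : List (List Int) :=
  let n := anc_list.length + 1
  anc_list.zipIdx.foldl
    (fun (buckets : List (List Int)) p =>
      if 0 ≤ p.1 ∧ p.1 < (n : Int) then
        buckets.set p.1.toNat (buckets.getD p.1.toNat [] ++ [(p.2 : Int)])
      else buckets)
    (List.replicate n [])

-- ===== PRECONDITION & SPEC =====
def Spec_to_descendants_list (anc_list : List Int) (out : List (List Int)) : Prop := out = to_descendants_list_alt anc_list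
instance (anc_list : List Int) (out : List (List Int)) : Decidable (Spec_to_descendants_list anc_list out) := by unfold Spec_to_descendants_list; infer_instance

-- ===== CLAIM (what is proved, stated in full; the proofs are below) =====
def Claim_equal_to_descendants_list : Prop := ∀ (anc_list : List Int), Dom_to_descendants_list anc_list → Spec_to_descendants_list anc_list (to_descendants_list anc_list)

-- ===== LEMMAS AND PROOFS =====

-- canonical value: the ascending indices of the elements equal to i
def pvIdxs (i : Int) : List Int → List Int
  | [] => []
  | a :: tl => if a = i then 0 :: (pvIdxs i tl).map (· + 1) else (pvIdxs i tl).map (· + 1)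

def pvMask (i : Int) (l : List Int) : List Int := l.map (fun x => if x = i then -1 else x)

def pvMaskBelow (m : Nat) (l : List Int) : List Int :=
  l.map (fun x => if 0 ≤ x ∧ x < (m : Int) then -1 else x)

lemma pvInnerA_acc (i : Int) (k : Nat) :
    ∀ anc acc, pvInnerA i k anc acc = ((pvInnerA i k anc []).1, acc ++ (pvInnerA i k anc []).2) := by
  induction k with
  | zero => intro anc acc; simp [pvInnerA]
  | succ k ih =>
    intro anc acc
    cases h : PySem.List.index? anc i with
    | none =>
      simp only [PySem.List.index?] at h
      simp [pvInnerA, PySem.List.index?, h]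
    | some idx =>
      simp only [pvInnerA, h]
      rw [ih (anc.set idx (-1)) (acc ++ [(idx : Int)]),
          ih (anc.set idx (-1)) ([] ++ [(idx : Int)])]
      simp

lemma pvInnerA_shift (i : Int) (k : Nat) :
    ∀ (c : Int) (tl : List Int), c ≠ i →
      pvInnerA i k (c :: tl) [] =
        (c :: (pvInnerA i k tl []).1, (pvInnerA i k tl []).2.map (· + 1)) := by
  induction k with
  | zero => intro c tl _; simp [pvInnerA]
  | succ k ih =>
    intro c tl hc
    have hbeq : (c == i) = false := by simp [hc]
    cases h : List.idxOf? i tl with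
    | none =>
      simp [pvInnerA, PySem.List.index?, List.idxOf?_cons, hbeq, h]
    | some idx =>
      have hA : pvInnerA i (k+1) (c :: tl) [] =
          pvInnerA i k ((c :: tl).set (idx+1) (-1)) ([] ++ [((idx+1 : Nat) : Int)]) := by
        simp [pvInnerA, PySem.List.index?, List.idxOf?_cons, hbeq, h]
      have hB : pvInnerA i (k+1) tl [] =
          pvInnerA i k (tl.set idx (-1)) ([] ++ [(idx : Int)]) := by
        simp [pvInnerA, PySem.List.index?, h]
      rw [hA, hB]
      have hset : (c :: tl).set (idx + 1) (-1) = c :: tl.set idx (-1) := by simp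
      rw [hset]
      rw [pvInnerA_acc i k (c :: tl.set idx (-1)) ([] ++ [((idx+1 : Nat) : Int)])]
      rw [ih c (tl.set idx (-1)) hc]
      rw [pvInnerA_acc i k (tl.set idx (-1)) ([] ++ [(idx : Int)])]
      simp

lemma pvInnerA_main (i : Int) (hi : 0 ≤ i) :
    ∀ l : List Int, pvInnerA i (l.countP (· == i)) l [] = (pvMask i l, pvIdxs i l) := by
  intro l
  induction l with
  | nil => simp [pvInnerA, pvMask, pvIdxs]
  | cons a tl ih =>
    by_cases ha : a = i
    · subst ha
      have hcount : (a :: tl).countP (· == a) = tl.countP (· == a) + 1 := by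
        simp
      rw [hcount]
      have hA : pvInnerA a (tl.countP (· == a) + 1) (a :: tl) [] =
          pvInnerA a (tl.countP (· == a)) ((a :: tl).set 0 (-1)) ([] ++ [((0:Nat) : Int)]) := by
        simp [pvInnerA, PySem.List.index?, List.idxOf?_cons]
      rw [hA]
      have hset : (a :: tl).set 0 (-1) = (-1) :: tl := by simp
      rw [hset]
      rw [pvInnerA_acc a (tl.countP (· == a)) ((-1) :: tl) ([] ++ [((0:Nat) : Int)])]
      have hne : (-1 : Int) ≠ a := by omega
      rw [pvInnerA_shift a (tl.countP (· == a)) (-1) tl hne, ih]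
      simp [pvMask, pvIdxs]
    · have hcount : (a :: tl).countP (· == i) = tl.countP (· == i) := by
        simp [ha]
      rw [hcount, pvInnerA_shift i (tl.countP (· == i)) a tl ha, ih]
      simp [pvMask, pvIdxs, ha]

lemma pvIdxs_map_iff (i : Int) (f : Int → Int) :
    ∀ l : List Int, (∀ x ∈ l, (f x = i ↔ x = i)) → pvIdxs i (l.map f) = pvIdxs i l := by
  intro l
  induction l with
  | nil => simp
  | cons a tl ih =>
    intro h
    have ha := h a (by simp)
    simp only [List.map_cons, pvIdxs]
    by_cases hx : a = i
    · rw [if_pos (ha.mpr hx), if_pos hx, ih (fun x hxm => h x (by simp [hxm]))]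
    · rw [if_neg (fun hf => hx (ha.mp hf)), if_neg hx, ih (fun x hxm => h x (by simp [hxm]))]

lemma pvMask_maskBelow (m : Nat) (l : List Int) :
    pvMask (m : Int) (pvMaskBelow m l) = pvMaskBelow (m + 1) l := by
  simp only [pvMask, pvMaskBelow, List.map_map]
  apply List.map_congr_left
  intro x _
  simp only [Function.comp]
  split_ifs <;> push_cast at * <;> omega

lemma pvIdxs_maskBelow (m : Nat) (l : List Int) :
    pvIdxs (m : Int) (pvMaskBelow m l) = pvIdxs (m : Int) l := by
  apply pvIdxs_map_iff
  intro x _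
  constructor
  · intro h
    by_cases hx : 0 ≤ x ∧ x < (m : Int)
    · rw [if_pos hx] at h; omega
    · rwa [if_neg hx] at h
  · intro h; subst h; rw [if_neg (by omega)]

lemma pvSum_count (i : Int) (l : List Int) :
    ((l.map (fun x => if x = i then (1 : Int) else 0)).sum).toNat = l.countP (· == i) := by
  have heq : (fun x : Int => if x = i then (1 : Int) else 0)
       = (fun x : Int => if ((x == i) = true) then (1 : Int) else 0) := by
    funext x; simp
  rw [heq, PySem.List.sum_map_ite_one_zero]
  exact Int.toNat_natCast _

-- A's outer loop invariant
lemma portA_fold (l : List Int) (m : Nat) :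
    (List.range m).foldl
      (fun (st : List Int × List (List Int)) (i : Nat) =>
        ((pvInnerA (i : Int) ((st.1.map (fun x => if x = (i : Int) then (1 : Int) else 0)).sum).toNat st.1 []).1,
         st.2 ++ [(pvInnerA (i : Int) ((st.1.map (fun x => if x = (i : Int) then (1 : Int) else 0)).sum).toNat st.1 []).2]))
      (l, [])
    = (pvMaskBelow m l, (List.range m).map (fun (i : Nat) => pvIdxs (i : Int) l)) := by
  induction m with
  | zero =>
    simp only [List.range_zero, List.foldl_nil, List.map_nil]
    have h0 : pvMaskBelow 0 l = l := by
      unfold pvMaskBelow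
      nth_rewrite 2 [← List.map_id l]
      apply List.map_congr_left
      intro x _
      simp only [id_eq]
      rw [if_neg (by omega)]
    rw [h0]
  | succ m ih =>
    rw [List.range_succ, List.foldl_append, ih]
    simp only [List.foldl_cons, List.foldl_nil]
    rw [pvSum_count ((m : Int)) (pvMaskBelow m l)]
    rw [pvInnerA_main (m : Int) (by positivity) (pvMaskBelow m l)]
    rw [pvMask_maskBelow, pvIdxs_maskBelow]
    simp

lemma portA_eq (l : List Int) :
    to_descendants_list l = (List.range (l.length + 1)).map (fun (i : Nat) => pvIdxs (i : Int) l) := by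
  unfold to_descendants_list
  dsimp only
  rw [portA_fold l (l.length + 1)]

-- B side
def pvSel (i : Int) (ps : List (Int × Nat)) : List Int :=
  (ps.filter (fun p => p.1 == i)).map (fun p => ((p.2 : Nat) : Int))

lemma portB_fold (n : Nat) :
    ∀ (ps : List (Int × Nat)) (B0 : List (List Int)), B0.length = n →
      ps.foldl
        (fun (buckets : List (List Int)) p =>
          if 0 ≤ p.1 ∧ p.1 < (n : Int) then
            buckets.set p.1.toNat (buckets.getD p.1.toNat [] ++ [(p.2 : Int)])
          else buckets)
        B0
      = (List.range n).map (fun i => B0.getD i [] ++ pvSel (i : Int) ps) := by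
  intro ps
  induction ps with
  | nil =>
    intro B0 hB
    simp only [List.foldl_nil, pvSel, List.filter_nil, List.map_nil, List.append_nil]
    apply List.ext_getElem
    · simp [hB]
    · intro j h1 h2
      simp only [List.getElem_map, List.getElem_range]
      rw [List.getD_eq_getElem _ _ (by omega)]
  | cons p ps ih =>
    intro B0 hB
    obtain ⟨v, j⟩ := p
    simp only [List.foldl_cons]
    by_cases hg : 0 ≤ v ∧ v < (n : Int)
    · rw [if_pos hg]
      rw [ih _ (by simp [hB])]
      apply List.map_congr_left
      intro i hi
      simp only [List.mem_range] at hi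
      have hvn : v.toNat < n := by omega
      by_cases hiv : i = v.toNat
      · subst hiv
        rw [List.getD_eq_getElem _ _ (by simp [hB, hvn]),
            List.getElem_set_self]
        simp only [pvSel, List.filter_cons]
        rw [show (v == ((v.toNat : Nat) : Int)) = true by simp; omega]
        simp [List.append_assoc]
      · rw [List.getD_eq_getElem _ _ (by simp [hB, hi]),
            List.getElem_set_ne (h := by omega)]
        simp only [pvSel, List.filter_cons]
        rw [show (v == ((i : Nat) : Int)) = false by simp; omega]
        simp only [Bool.false_eq_true, if_false]
        rw [List.getD_eq_getElem B0 [] (show i < B0.length by omega)]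
    · rw [if_neg hg]
      rw [ih B0 hB]
      apply List.map_congr_left
      intro i hi
      simp only [List.mem_range] at hi
      simp only [pvSel, List.filter_cons]
      rw [show (v == ((i : Nat) : Int)) = false by
            simp
            intro h
            subst h
            exact hg ⟨by positivity, by exact_mod_cast hi⟩]
      simp only [Bool.false_eq_true, if_false]

lemma pvSel_zipIdx (i : Int) :
    ∀ (l : List Int) (k : Nat), pvSel i (l.zipIdx k) = (pvIdxs i l).map (· + (k : Int)) := by
  intro l
  induction l with
  | nil => intro k; simp [pvSel, pvIdxs]
  | cons a tl ih =>
    intro k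
    simp only [List.zipIdx_cons, pvSel, List.filter_cons]
    by_cases ha : a = i
    · rw [show (a == i) = true by simp [ha]]
      simp only [if_true, List.map_cons]
      have hih := ih (k + 1)
      simp only [pvSel] at hih
      rw [hih]
      simp only [pvIdxs, if_pos ha, List.map_cons, List.map_map]
      refine List.cons_eq_cons.mpr ⟨by ring, ?_⟩
      apply List.map_congr_left
      intro x _
      simp only [Function.comp_apply]
      push_cast
      ring
    · rw [show (a == i) = false by simp [ha]]
      simp only [Bool.false_eq_true, if_false]
      have hih := ih (k + 1)
      simp only [pvSel] at hih
      rw [hih]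
      simp only [pvIdxs, if_neg ha, List.map_map]
      apply List.map_congr_left
      intro x _
      simp only [Function.comp_apply]
      push_cast
      ring

lemma portB_eq (l : List Int) :
    to_descendants_list_alt l = (List.range (l.length + 1)).map (fun (i : Nat) => pvIdxs (i : Int) l) := by
  unfold to_descendants_list_alt
  dsimp only
  rw [portB_fold (l.length + 1) (l.zipIdx 0) (List.replicate (l.length + 1) []) (by simp)]
  apply List.map_congr_left
  intro i hi
  simp only [List.mem_range] at hi
  rw [List.getD_eq_getElem _ _ (by simp [hi]), List.getElem_replicate]
  rw [pvSel_zipIdx]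
  simp

-- ===== VERDICT (by name: the statement is the Claim_ definition above) =====
theorem to_descendants_list_spec : Claim_equal_to_descendants_list := by
  intro l _
  unfold Spec_to_descendants_list
  rw [portA_eq, portB_eq]
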